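-- pv_equiv track=rewrite | github.com/klopesb/trabalho_AASB | src/Blast.py | query_map
-- ===== SOURCE A (Python) =====
-- def query_map(query, w):
--   """
--   Creates a dictionary of words and their starting indices in the query.
--
--   Args:
--     query: The input query sequence.
--     w: The length of the words (substrings).
--
--   Returns:
--     A dictionary where keys are substrings of length `w` from the `query`
--     and values are lists of their starting indices in the `query`.
--   """
--   map_dict = {}
--   for i in range(len(query) - w + 1):
--     subseq = query[i:i + w]
--     if subseq not in map_dict:
--       map_dict[subseq] = []
--     map_dict[subseq].append(i)
--   return map_dict
-- ===== SOURCE B (Python) =====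
-- def query_map(query, w):
--     subs = [query[i:i + w] for i in range(len(query) - w + 1)]
--     return {s: [i for i, t in enumerate(subs) if t == s] for s in dict.fromkeys(subs)}
-- ===== Notes on version B (the rewrite author's own statement) =====
-- stated objective: simpler
-- what changed: A builds the dict in one pass, testing membership and appending each index to its substring's bucket; B instead materialises the substring list, deduplicates it with dict.fromkeys to get the distinct words in first-occurrence order, and gathers each word's index list by a comprehension over the enumerated substring list.
import Mathlib
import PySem

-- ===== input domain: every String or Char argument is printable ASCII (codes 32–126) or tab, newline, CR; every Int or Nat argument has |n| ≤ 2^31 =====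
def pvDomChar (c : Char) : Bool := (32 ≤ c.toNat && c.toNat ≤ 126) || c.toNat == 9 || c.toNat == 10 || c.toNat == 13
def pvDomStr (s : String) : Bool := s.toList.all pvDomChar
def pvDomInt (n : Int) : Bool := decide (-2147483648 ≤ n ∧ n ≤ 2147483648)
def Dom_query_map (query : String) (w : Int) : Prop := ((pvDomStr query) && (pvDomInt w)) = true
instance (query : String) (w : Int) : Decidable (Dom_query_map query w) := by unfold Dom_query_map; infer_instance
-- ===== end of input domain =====

-- B replaces A's single membership-test-and-append pass by a two-step decomposition:
-- deduplicate the substring list (first occurrences, dict.fromkeys) and gather each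
-- word's indices by a comprehension over the enumerated substring list. Not faster.

-- ===== PORT A =====
def query_map (query : String) (w : Int) : List (String × List Int) :=
  let map_dict := (PySem.List.pyRange 0 (PySem.Str.len query - w + 1) 1).foldl
    (fun d i =>
      let subseq := PySem.Str.slice query (some i) (some (i + w))
      let d := if d.contains subseq then d else d.insert subseq ([] : List Int)
      d.modify subseq [] (· ++ [i]))  -- map_dict[subseq].append(i)
    PySem.Dict.empty
  map_dict.items

-- ===== PORT B =====
def query_map_alt (query : String) (w : Int) : List (String × List Int) :=
  let subs := (PySem.List.pyRange 0 (PySem.Str.len query - w + 1) 1).map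
    (fun i => PySem.Str.slice query (some i) (some (i + w)))
  (PySem.List.dedup subs).map (fun s =>
    (s, ((PySem.List.enumerate subs).filter (fun p => p.2 == s)).map (fun p => p.1)))

-- ===== PRECONDITION & SPEC =====
def Spec_query_map (query : String) (w : Int) (out : List (String × List Int)) : Prop := out = query_map_alt query w
instance (query : String) (w : Int) (out : List (String × List Int)) : Decidable (Spec_query_map query w out) := by unfold Spec_query_map; infer_instance

-- ===== CLAIM (what is proved, stated in full; the proofs are below) =====
def Claim_equal_query_map : Prop := ∀ (query : String) (w : Int), Dom_query_map query w → Spec_query_map query w (query_map query w)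

-- ===== LEMMAS AND PROOFS =====

theorem pv_ins_ins {ν : Type} (d : PySem.Dict String ν) (k : String) (v v' : ν) :
    (d.insert k v).insert k v' = d.insert k v' := by
  apply PySem.Dict.ext
  by_cases h : d.contains k = true
  · rw [PySem.Dict.items_insert_of_contains _ v' (PySem.Dict.contains_insert_self d k v),
      PySem.Dict.items_insert_of_contains d v h,
      PySem.Dict.items_insert_of_contains d v' h, List.map_map]
    apply List.map_congr_left
    intro p _
    by_cases hp : p.1 = k <;> simp [hp]
  · rw [PySem.Dict.items_insert_of_contains _ v' (PySem.Dict.contains_insert_self d k v),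
      PySem.Dict.items_insert_of_not_contains d v (by simpa using h),
      PySem.Dict.items_insert_of_not_contains d v' (by simpa using h),
      List.map_append]
    have hmem : ∀ p ∈ d.items, (p.1 == k) = false := by
      intro p hp
      by_contra hc
      have hc' : p.1 = k := by simpa using eq_true_of_ne_false (fun hf => hc hf)
      refine h ?_
      rw [PySem.Dict.contains_iff_mem_keys]
      exact hc' ▸ List.mem_map_of_mem hp
    congr 1
    · conv_rhs => rw [← List.map_id d.items]
      apply List.map_congr_left
      intro p hp
      simp [hmem p hp]
    · simp

theorem pv_stepA_eq (d : PySem.Dict String (List Int)) (s : String) (i : Int) :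
    (if d.contains s then d else d.insert s ([] : List Int)).modify s [] (· ++ [i])
      = d.modify s [] (· ++ [i]) := by
  by_cases h : d.contains s = true
  · simp [h]
  · simp only [h, Bool.false_eq_true, if_false]
    show (d.insert s []).insert s ((d.insert s []).getD s [] ++ [i]) = d.insert s (d.getD s [] ++ [i])
    have hfalse : d.contains s = false := by simpa using h
    rw [PySem.Dict.getD_insert_self, pv_ins_ins, PySem.Dict.getD_of_not_contains d ([] : List Int) hfalse]

theorem pv_items_eq_keys_map {ν : Type} (d : PySem.Dict String ν) (d0 : ν)
    (h : d.keys.Nodup) : d.items = d.keys.map (fun k => (k, d.getD k d0)) := by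
  have hkeys : d.keys = d.items.map (fun p => p.1) := rfl
  rw [hkeys, List.map_map]
  conv_lhs => rw [← List.map_id d.items]
  apply List.map_congr_left
  intro p hp
  have hg := PySem.Dict.getD_of_mem_items d (k := p.1) (v := p.2) (by simpa using hp) h d0
  simp [hg]

theorem pv_range_len (hi : Int) :
    PySem.List.pyRange 0 (((PySem.List.pyRange 0 hi 1).length : Int)) 1 = PySem.List.pyRange 0 hi 1 := by
  rw [PySem.List.pyRange_one 0 hi, PySem.List.pyRange_one]
  have : (max hi 0).toNat = hi.toNat := by omega
  simp [this]

-- ===== VERDICT (by name: the statement is the Claim_ definition above) =====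
theorem query_map_spec : Claim_equal_query_map := by
  intro query w _
  unfold Spec_query_map query_map query_map_alt
  dsimp only
  set f : Int → String := fun i => PySem.Str.slice query (some i) (some (i + w)) with hf
  set hi : Int := PySem.Str.len query - w + 1 with hhi
  set L : List Int := PySem.List.pyRange 0 hi 1 with hL
  -- ===== A side =====
  have hA1 : L.foldl
      (fun d i =>
        let subseq := f i
        let d := if d.contains subseq then d else d.insert subseq ([] : List Int)
        d.modify subseq [] (· ++ [i])) PySem.Dict.empty
      = L.foldl (fun d i => d.modify (f i) [] (· ++ [i])) PySem.Dict.empty := by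
    exact PySem.List.foldl_congr_mem L _ _ _ (fun acc x _ => pv_stepA_eq acc (f x) x)
  have hA2 : L.foldl (fun d i => d.modify (f i) [] (· ++ [i])) PySem.Dict.empty
      = (L.map (fun i => (f i, i))).foldl
          (fun d p => d.modify p.1 [] (· ++ [p.2])) PySem.Dict.empty := by
    rw [List.foldl_map]
  set DA : PySem.Dict String (List Int) :=
    (L.map (fun i => (f i, i))).foldl (fun d p => d.modify p.1 [] (· ++ [p.2])) PySem.Dict.empty with hDA
  have hAkeys : DA.keys = PySem.Set.ofList (L.map f) := by
    have h := PySem.Dict.keys_foldl_modify_key (κ := String) (ν := List Int)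
      (L.map (fun i => (f i, i))) Prod.fst ([] : List Int)
      (fun _ p v => v ++ [p.2]) PySem.Dict.empty
    refine Eq.trans ?_ (h.trans ?_)
    · rfl
    · simp [PySem.Set.update_nil_left, List.map_map, Function.comp_def]
  have hAnodup : DA.keys.Nodup := by rw [hAkeys]; exact PySem.Set.nodup_ofList _
  have hAgetD : ∀ k, DA.getD k [] = L.filter (fun i => f i == k) := by
    intro k
    rw [hDA, PySem.Dict.getD_foldl_modify_append]
    simp [List.filter_map, List.map_map, Function.comp_def]
  -- ===== B side =====
  have hded : PySem.List.dedup (L.map f) = PySem.Set.ofList (L.map f) :=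
    PySem.List.dedup_eq_ofList _
  have hE : PySem.List.enumerate (L.map f) = L.map (fun j => (j, f j)) := by
    have hlen2 : PySem.List.len (List.map f L) = ((L.length : Int)) := by
      simp [PySem.List.len]
    rw [PySem.List.enumerate_eq_map_pyRange (d := ""), hlen2, hL, pv_range_len]
    apply List.map_congr_left
    intro j hj
    rw [PySem.List.mem_pyRange_one] at hj
    rw [PySem.List.pyGetD_map_pyRange_of_nonneg f hi j "" hj.1 hj.2]
  -- ===== assemble =====
  rw [hA1, hA2, hded, hE]
  rw [pv_items_eq_keys_map DA [] hAnodup, hAkeys]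
  apply List.map_congr_left
  intro k _
  rw [hAgetD]
  simp [List.filter_map, List.map_map, Function.comp_def]
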